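-- pv_equiv track=rewrite | github.com/andy31lewis/brycharts | brycharts/brycharts.py | fromRawData
-- ===== SOURCE A (Python) =====
-- def fromRawData(rawdata):
--     #return sorted(Counter(rawdata).items())
--     counter = {}
--     for x in rawdata:
--         if x in counter:
--             counter[x] += 1
--         else:
--             counter[x] = 1
--     return sorted(counter.items())
-- ===== SOURCE B (Python) =====
-- def fromRawData(rawdata):
--     # sort once, then one linear pass run-length-grouping consecutive equal values
--     items = []
--     for x in sorted(rawdata):
--         if items and items[-1][0] == x:
--             k, c = items[-1]
--             items[-1] = (x, c + 1)
--         else: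
--             items.append((x, 1))
--     return items
-- ===== Notes on version B (the rewrite author's own statement) =====
-- stated objective: alternative
-- what changed: B replaces A's hash-map counting followed by a sort of the (key,count) items with a sort of the raw data followed by a single run-length grouping pass over consecutive equal values.
import Mathlib
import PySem

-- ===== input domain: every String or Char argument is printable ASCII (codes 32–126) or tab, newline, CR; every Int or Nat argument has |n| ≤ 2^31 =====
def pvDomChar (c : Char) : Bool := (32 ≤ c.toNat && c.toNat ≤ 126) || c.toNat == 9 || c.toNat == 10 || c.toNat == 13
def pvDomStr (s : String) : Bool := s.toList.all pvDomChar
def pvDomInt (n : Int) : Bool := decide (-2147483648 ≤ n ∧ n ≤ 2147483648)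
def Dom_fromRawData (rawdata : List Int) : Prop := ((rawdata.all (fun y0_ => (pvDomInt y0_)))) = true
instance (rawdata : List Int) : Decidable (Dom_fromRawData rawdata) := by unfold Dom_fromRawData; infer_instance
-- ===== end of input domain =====

-- B counts by sorting the data once and run-length grouping consecutive equal values,
-- instead of A's hash-map counting followed by a sort of the (key, count) items.

-- ===== PORT A =====
def fromRawData (rawdata : List Int) : List (Int × Int) :=
  let counter : PySem.Dict Int Int :=
    rawdata.foldl
      (fun d x => if d.contains x then d.modify x 0 (· + 1) else d.insert x 1)
      (PySem.Dict.mk [])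
  PySem.List.sorted2 counter.items Prod.fst Prod.snd

-- ===== PORT B =====
-- one step of Source B's loop body: extend/append the run-length list with x
def rleStep (items : List (Int × Int)) (x : Int) : List (Int × Int) :=
  match items.getLast? with
  | some (k, c) => if k = x then items.dropLast ++ [(x, c + 1)] else items ++ [(x, 1)]
  | none => [(x, 1)]

def fromRawData_alt (rawdata : List Int) : List (Int × Int) :=
  (PySem.List.sorted rawdata (fun x => x) false).foldl rleStep []

-- ===== PRECONDITION & SPEC =====
def Spec_fromRawData (rawdata : List Int) (out : List (Int × Int)) : Prop := out = fromRawData_alt rawdata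
instance (rawdata : List Int) (out : List (Int × Int)) : Decidable (Spec_fromRawData rawdata out) := by unfold Spec_fromRawData; infer_instance

-- ===== CLAIM (what is proved, stated in full; the proofs are below) =====
def Claim_equal_fromRawData : Prop := ∀ (rawdata : List Int), Dom_fromRawData rawdata → Spec_fromRawData rawdata (fromRawData rawdata)

-- ===== LEMMAS AND PROOFS =====

-- the common canonical value: (k, multiplicity of k) over the sorted distinct values
def canon (rawdata : List Int) : List (Int × Int) :=
  (PySem.List.sorted (PySem.Set.ofList rawdata) (fun x => x) false).map
    (fun k => (k, (rawdata.count k : Int)))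

-- ---- A side ----

lemma fold_eq_counter (l : List Int) :
    l.foldl (fun d x => if d.contains x then d.modify x 0 (· + 1) else d.insert x 1)
      (PySem.Dict.mk []) = PySem.Dict.counter l := by
  rw [PySem.Dict.counter_eq_foldl]
  apply PySem.List.foldl_congr_mem
  intro d x _
  by_cases h : d.contains x = true
  · simp [h]
  · simp only [h, Bool.false_eq_true, if_false, PySem.Dict.modify]
    have hg : d.getD x 0 = 0 := by
      simp only [PySem.Dict.contains, List.any_eq_true, not_exists] at h
      simp only [PySem.Dict.getD, PySem.Dict.get?]
      rw [List.find?_eq_none.mpr]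
      · rfl
      · intro p hp
        simp at h ⊢
        exact h p.1 p.2 hp
    rw [hg]
    norm_num

lemma insertBy_congr {α : Type} (p q : α → α → Bool) (x : α) (acc : List α)
    (h : ∀ y ∈ acc, p x y = q x y) :
    PySem.List.insertBy p x acc = PySem.List.insertBy q x acc := by
  induction acc with
  | nil => rfl
  | cons y ys ih =>
    simp only [PySem.List.insertBy]
    rw [h y (by simp)]
    split
    · rfl
    · rw [ih (fun z hz => h z (by simp [hz]))]

lemma foldl_insertBy_congr {α : Type} (p q : α → α → Bool) :
    ∀ (xs acc : List α),
      (∀ a ∈ xs, ∀ y ∈ acc, p a y = q a y) →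
      (∀ a ∈ xs, ∀ b ∈ xs, p a b = q a b) →
      xs.foldl (fun acc x => PySem.List.insertBy p x acc) acc
        = xs.foldl (fun acc x => PySem.List.insertBy q x acc) acc := by
  intro xs
  induction xs with
  | nil => intro acc _ _; rfl
  | cons x t ih =>
    intro acc h1 h2
    simp only [List.foldl_cons]
    rw [insertBy_congr p q x acc (h1 x (by simp))]
    apply ih
    · intro a ha y hy
      rcases (PySem.List.mem_insertBy q x y acc).mp hy with rfl | hy
      · exact h2 a (by simp [ha]) y (by simp)
      · exact h1 a (by simp [ha]) y hy
    · intro a ha b hb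
      exact h2 a (by simp [ha]) b (by simp [hb])

lemma sorted2_eq_sorted_fst (xs : List (Int × Int))
    (h : ∀ a ∈ xs, ∀ b ∈ xs, a.1 = b.1 → a = b) :
    PySem.List.sorted2 xs Prod.fst Prod.snd = PySem.List.sorted xs Prod.fst := by
  unfold PySem.List.sorted2 PySem.List.sorted
  simp only [if_neg (by decide : ¬ (false = true))]
  apply foldl_insertBy_congr
  · intro _ _ y hy; simp at hy
  · intro a ha b hb
    by_cases hfst : a.1 = b.1
    · have : a = b := h a ha b hb hfst
      subst this
      simp
    · rcases lt_trichotomy a.1 b.1 with hlt | heq | hgt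
      · simp [hlt]
      · exact absurd heq hfst
      · simp [hgt, not_lt_of_gt hgt]

lemma fromRawData_eq_canon (rawdata : List Int) : fromRawData rawdata = canon rawdata := by
  have h0 : fromRawData rawdata
      = PySem.List.sorted2 ((PySem.Set.ofList rawdata).map
          (fun k => (k, (rawdata.count k : Int)))) Prod.fst Prod.snd := by
    have h1 : fromRawData rawdata
        = PySem.List.sorted2
            (rawdata.foldl
              (fun d x => if d.contains x then d.modify x 0 (· + 1) else d.insert x 1)
              (PySem.Dict.mk [])).items Prod.fst Prod.snd := rfl
    rw [h1, fold_eq_counter, PySem.Dict.items_counter]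
  rw [h0, sorted2_eq_sorted_fst]
  · apply PySem.List.sorted_eq_of_perm_of_pairwise_lt
    · exact ((PySem.List.sorted_perm (PySem.Set.ofList rawdata) (fun x => x) false).map _)
    · exact (PySem.List.sorted_ofList_pairwise_lt rawdata).map _ (by intro a b hab; simpa using hab)
  · intro a ha b hb hfst
    simp only [List.mem_map] at ha hb
    obtain ⟨k, _, rfl⟩ := ha
    obtain ⟨k', _, rfl⟩ := hb
    simp only at hfst
    subst hfst
    rfl

-- ---- B side ----

lemma dedup_append_singleton (l : List Int) (x : Int) :
    PySem.List.dedup (l ++ [x])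
      = if x ∈ l then PySem.List.dedup l else PySem.List.dedup l ++ [x] := by
  have : ∀ (m : List Int), PySem.List.dedup m = m.foldl PySem.Set.add [] := fun m => rfl
  rw [this, List.foldl_append, ← this]
  simp only [List.foldl_cons, List.foldl_nil, PySem.Set.add]
  by_cases hx : x ∈ l
  · rw [if_pos, if_pos hx]
    simpa [List.contains_iff_mem, PySem.List.mem_dedup] using hx
  · rw [if_neg, if_neg hx]
    simpa [List.contains_iff_mem, PySem.List.mem_dedup] using hx

lemma dedup_sublist (l : List Int) : (PySem.List.dedup l).Sublist l := by
  induction l using List.reverseRecOn with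
  | nil => simp [PySem.List.dedup]
  | append_singleton l x ih =>
    rw [dedup_append_singleton]
    split
    · exact ih.trans (List.sublist_append_left l [x])
    · exact ih.append (List.Sublist.refl [x])

lemma dedup_eq_nil_iff (l : List Int) : PySem.List.dedup l = [] ↔ l = [] := by
  constructor
  · intro h
    cases l with
    | nil => rfl
    | cons a t =>
      have ha := (PySem.List.mem_dedup (a :: t) a).mpr (by simp)
      rw [h] at ha
      simp at ha
  · rintro rfl; rfl

lemma pairwise_lt_dedup (l : List Int) (h : l.Pairwise (· ≤ ·)) :
    (PySem.List.dedup l).Pairwise (· < ·) := by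
  have hle := h.sublist (dedup_sublist l)
  have hne := PySem.List.nodup_dedup l
  exact (hle.and hne).imp (fun ⟨h1, h2⟩ => lt_of_le_of_ne h1 h2)

lemma getLast?_of_max (x : Int) :
    ∀ (l : List Int), l.Pairwise (· < ·) → x ∈ l → (∀ y ∈ l, y ≤ x) →
      l.getLast? = some x := by
  intro l
  induction l with
  | nil => intro _ hx; simp at hx
  | cons a t ih =>
    intro hp hx hmax
    cases t with
    | nil => simp at hx; simp [hx]
    | cons b t' =>
      have hab : a < b := (List.pairwise_cons.mp hp).1 b (by simp)
      have hxbt : x ∈ b :: t' := by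
        rcases List.mem_cons.mp hx with rfl | hx'
        · exact absurd (hmax b (by simp)) (by omega)
        · exact hx'
      rw [List.getLast?_cons_cons]
      exact ih (List.pairwise_cons.mp hp).2 hxbt (fun y hy => hmax y (by simp [hy]))

lemma rleStep_some {items : List (Int × Int)} {k c x : Int} (h : items.getLast? = some (k, c)) :
    rleStep items x = if k = x then items.dropLast ++ [(x, c + 1)] else items ++ [(x, 1)] := by
  unfold rleStep; rw [h]

lemma rle_correct :
    ∀ (l : List Int), l.Pairwise (· ≤ ·) →
      l.foldl rleStep []
        = (PySem.List.dedup l).map (fun k => (k, (l.count k : Int))) := by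
  intro l
  induction l using List.reverseRecOn with
  | nil => intro _; rfl
  | append_singleton l x ih =>
    intro h
    have hl : l.Pairwise (· ≤ ·) := h.sublist (List.sublist_append_left l [x])
    have hmax : ∀ y ∈ l, y ≤ x := by
      have := List.pairwise_append.mp h
      intro y hy; exact this.2.2 y hy x (by simp)
    rw [List.foldl_append, List.foldl_cons, List.foldl_nil, ih hl]
    by_cases hx : x ∈ l
    · -- x extends the last run
      have hlast : (PySem.List.dedup l).getLast? = some x :=
        getLast?_of_max x _ (pairwise_lt_dedup l hl)
          ((PySem.List.mem_dedup l x).mpr hx)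
          (fun y hy => hmax y ((PySem.List.mem_dedup l y).mp hy))
      obtain ⟨init, hinit⟩ : ∃ init, PySem.List.dedup l = init ++ [x] :=
        ⟨(PySem.List.dedup l).dropLast,
          (List.dropLast_append_getLast? x hlast).symm⟩
      have hnd := PySem.List.nodup_dedup l
      rw [hinit] at hnd
      have hkx : ∀ k ∈ init, k ≠ x := by
        intro k hk
        exact (List.nodup_append.mp hnd).2.2 k hk x (by simp)
      rw [dedup_append_singleton, if_pos hx, hinit]
      simp only [List.map_append, List.map_cons, List.map_nil]
      rw [rleStep_some (k := x) (c := (l.count x : Int)) List.getLast?_concat,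
        if_pos rfl, List.dropLast_concat]
      congr 1
      · apply List.map_congr_left
        intro k hk
        have hne : k ≠ x := hkx k hk
        simp [List.count_append, List.count_eq_zero, hne]
      · simp [List.count_append]
    · -- x starts a fresh run
      rw [dedup_append_singleton, if_neg hx]
      have hcnt0 : l.count x = 0 := List.count_eq_zero.mpr hx
      have hmapc : ∀ k ∈ PySem.List.dedup l,
          ((l ++ [x]).count k : Int) = (l.count k : Int) := by
        intro k hk
        have hne : k ≠ x := by
          intro h'; subst h'
          exact hx ((PySem.List.mem_dedup l k).mp hk)
        simp [List.count_append, List.count_eq_zero, hne]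
      cases hd : PySem.List.dedup l with
      | nil =>
        have hnil : l = [] := (dedup_eq_nil_iff l).mp hd
        subst hnil
        simp [rleStep]
      | cons a t =>
        have hlast2 : ((a :: t).map (fun k => (k, (l.count k : Int)))).getLast? =
            some ((a :: t).getLast (by simp), (l.count ((a :: t).getLast (by simp)) : Int)) := by
          rw [List.getLast?_eq_some_getLast (by simp), List.getLast_map (by simp)]
        have hkmem : (a :: t).getLast (by simp) ∈ a :: t := List.getLast_mem _
        have hkne : (a :: t).getLast (by simp) ≠ x := by
          intro h'
          exact hx ((PySem.List.mem_dedup l x).mp (by rw [hd]; exact h' ▸ hkmem))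
        rw [rleStep_some hlast2, if_neg hkne]
        rw [List.map_append]
        congr 1
        · apply List.map_congr_left
          intro y hy
          rw [hmapc y (by rw [hd]; exact hy)]
        · simp [List.count_append, hcnt0]

lemma fromRawData_alt_eq_canon (rawdata : List Int) :
    fromRawData_alt rawdata = canon rawdata := by
  unfold fromRawData_alt canon
  have hsp : (PySem.List.sorted rawdata (fun x => x) false).Pairwise (· ≤ ·) :=
    PySem.List.sorted_pairwise rawdata (fun x => x)
  rw [rle_correct _ hsp]
  have hdd : PySem.List.dedup (PySem.List.sorted rawdata (fun x => x) false)
      = PySem.List.sorted (PySem.Set.ofList rawdata) (fun x => x) false := by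
    symm
    apply PySem.List.sorted_eq_of_perm_of_pairwise_lt
    · apply (List.perm_ext_iff_of_nodup (PySem.List.nodup_dedup _) ?_).mpr
      · intro a
        rw [PySem.List.mem_dedup, PySem.List.mem_sorted]
        simp [PySem.Set.mem_ofList]
      · exact PySem.Set.nodup_ofList rawdata
    · exact pairwise_lt_dedup _ hsp
  rw [hdd]
  apply List.map_congr_left
  intro k _
  have : (PySem.List.sorted rawdata (fun x => x) false).count k = rawdata.count k :=
    (PySem.List.sorted_perm rawdata (fun x => x) false).count_eq k
  rw [this]

-- ===== VERDICT (by name: the statement is the Claim_ definition above) =====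
theorem fromRawData_spec : Claim_equal_fromRawData := by
  intro rawdata _
  show fromRawData rawdata = fromRawData_alt rawdata
  rw [fromRawData_eq_canon, fromRawData_alt_eq_canon]
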